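-- pv_equiv track=rewrite | github.com/Dendendelen/CompGenomicsFa24 | assign3/hw3q2.py | get_all_suffixes
-- ===== SOURCE A (Python) =====
-- def get_all_suffixes(line):
--     suffix_list = []
--     suffix_index = {}
--
--     for i in range(len(line)):
--         suffix = line[i:]
--         suffix_list.append(suffix)
--         suffix_index[suffix] = i
--
--     return suffix_list, suffix_index
-- ===== SOURCE B (Python) =====
-- def get_all_suffixes(line):
--     # Build suffixes incrementally from the end (each char prepended once),
--     # then reverse so the list/dict match A's longest-first order.
--     pairs = []
--     suffix = ""
--     for i in range(len(line) - 1, -1, -1):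
--         suffix = line[i] + suffix
--         pairs.append((suffix, i))
--     pairs.reverse()
--     return [s for s, _ in pairs], dict(pairs)
-- ===== Notes on version B (the rewrite author's own statement) =====
-- stated objective: alternative
-- what changed: Builds each suffix incrementally by prepending one character while scanning from the end (collecting (suffix,i) pairs, reversed at the end), instead of taking an independent slice line[i:] at every position.
import Mathlib
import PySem

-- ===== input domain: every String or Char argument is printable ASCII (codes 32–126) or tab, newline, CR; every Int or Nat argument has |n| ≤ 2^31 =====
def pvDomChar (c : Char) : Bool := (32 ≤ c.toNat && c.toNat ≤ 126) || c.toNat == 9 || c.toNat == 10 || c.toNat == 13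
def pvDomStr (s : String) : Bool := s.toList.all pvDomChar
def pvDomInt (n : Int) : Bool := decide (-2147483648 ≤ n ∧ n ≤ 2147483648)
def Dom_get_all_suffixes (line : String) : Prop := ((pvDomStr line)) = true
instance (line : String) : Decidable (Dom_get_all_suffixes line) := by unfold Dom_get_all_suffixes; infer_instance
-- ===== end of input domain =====

-- B builds each suffix incrementally by prepending one character while scanning from the
-- end (collecting (suffix, i) pairs, reversed at the end), instead of taking an
-- independent slice line[i:] at every position; same return value, alternative decomposition.

-- ===== PORT A =====
def get_all_suffixes (line : String) : List String × (List (String × Int)) :=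
  let st := (PySem.List.pyRange 0 (PySem.Str.len line) 1).foldl
    (fun (st : List String × PySem.Dict String Int) i =>
      let suffix := PySem.Str.slice line (some i) none
      (st.1 ++ [suffix], st.2.insert suffix i))
    ([], PySem.Dict.empty)
  (st.1, st.2.items)

-- ===== PORT B =====
-- the accumulated suffix string is carried as its char list; 'line[i] + suffix' is the cons
def get_all_suffixes_alt (line : String) : List String × (List (String × Int)) :=
  let cs := line.toList
  let st := (PySem.List.pyRange ((cs.length : Int) - 1) (-1) (-1)).foldl
    (fun (st : List (String × Int) × List Char) i =>
      let suffix := cs.getD i.toNat ' ' :: st.2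
      (st.1 ++ [(String.ofList suffix, i)], suffix))
    ([], [])
  let pairs := st.1.reverse
  (pairs.map (·.1), (PySem.Dict.ofList pairs).items)

-- ===== PRECONDITION & SPEC =====
def Spec_get_all_suffixes (line : String) (out : List String × (List (String × Int))) : Prop := out = get_all_suffixes_alt line
instance (line : String) (out : List String × (List (String × Int))) : Decidable (Spec_get_all_suffixes line out) := by unfold Spec_get_all_suffixes; infer_instance

-- ===== CLAIM (what is proved, stated in full; the proofs are below) =====
def Claim_equal_get_all_suffixes : Prop := ∀ (line : String), Dom_get_all_suffixes line → Spec_get_all_suffixes line (get_all_suffixes line)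

-- ===== LEMMAS AND PROOFS =====

-- the canonical value both ports compute
def pvCanonPairs (cs : List Char) : List (String × Int) :=
  (List.range cs.length).map (fun k => (String.ofList (cs.drop k), (k : Int)))

theorem pvOfListDropInj {cs : List Char} {j k : Nat} (hj : j < cs.length) (hk : k < cs.length)
    (h : String.ofList (cs.drop j) = String.ofList (cs.drop k)) : j = k := by
  have h2 := congrArg String.toList h
  simp only [String.toList_ofList] at h2
  have h3 := congrArg List.length h2
  simp only [List.length_drop] at h3
  omega

theorem pvFoldlProdSplit {ι α β : Type} (l : List ι) (f : α → ι → α) (g : β → ι → β)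
    (a : α) (b : β) :
    l.foldl (fun st i => (f st.1 i, g st.2 i)) (a, b) = (l.foldl f a, l.foldl g b) := by
  induction l generalizing a b with
  | nil => rfl
  | cons x xs ih => simp [List.foldl_cons, ih]

theorem pvFoldlAppMap {ι β : Type} (l : List ι) (f : ι → β) (acc : List β) :
    l.foldl (fun a x => a ++ [f x]) acc = acc ++ l.map f := by
  induction l generalizing acc with
  | nil => simp
  | cons x xs ih => simp [List.foldl_cons, ih]

theorem pvSliceEq (line : String) (k : Nat) :
    PySem.Str.slice line (some (k : Int)) none = String.ofList (line.toList.drop k) := by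
  have h : (PySem.Str.slice line (some (k : Int)) none).toList = line.toList.drop k := by
    simp [PySem.Str.toList_slice, PySem.List.slice_from_natCast]
  calc PySem.Str.slice line (some (k : Int)) none
      = String.ofList (PySem.Str.slice line (some (k : Int)) none).toList :=
        String.ofList_toList.symm
    _ = String.ofList (line.toList.drop k) := by rw [h]

theorem pvKeysNodup (cs : List Char) :
    ((List.range cs.length).map (fun k => String.ofList (cs.drop k))).Nodup := by
  refine (List.nodup_range).map_on ?_
  intro j hj k hk h
  exact pvOfListDropInj (List.mem_range.mp hj) (List.mem_range.mp hk) h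

theorem pvAEq (line : String) :
    get_all_suffixes line = ((pvCanonPairs line.toList).map (·.1), pvCanonPairs line.toList) := by
  unfold get_all_suffixes
  dsimp only
  rw [PySem.Str.len_eq]
  have hr : PySem.List.pyRange 0 (line.toList.length : Int) 1
      = (List.range line.toList.length).map (fun k => ((k : Nat) : Int)) := by
    rw [PySem.List.pyRange_one]; simp
  rw [hr, List.foldl_map,
    pvFoldlProdSplit (List.range line.toList.length)
      (fun a y => a ++ [PySem.Str.slice line (some ((y : Nat) : Int)) none])
      (fun d y => d.insert (PySem.Str.slice line (some ((y : Nat) : Int)) none) ((y : Nat) : Int))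
      [] PySem.Dict.empty, pvFoldlAppMap]
  dsimp only
  rw [Prod.mk.injEq]
  constructor
  · simp only [pvCanonPairs, List.nil_append, List.map_map]
    exact List.map_congr_left (fun k _ => by simp [pvSliceEq])
  · rw [PySem.Dict.items_foldl_insert_fresh (List.range line.toList.length)
      (fun k => PySem.Str.slice line (some (k : Int)) none) (fun k => ((k : Nat) : Int))
      PySem.Dict.empty (by intro a _; simp [PySem.Dict.contains_empty])
      (by simpa only [pvSliceEq] using pvKeysNodup line.toList)]
    simp only [PySem.Dict.empty, List.nil_append, pvCanonPairs]
    exact List.map_congr_left (fun k _ => by simp [pvSliceEq])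

theorem pvBFold (cs : List Char) (m : Nat) (hm : m ≤ cs.length) (acc : List (String × Int)) :
    (PySem.List.pyRange ((m : Int) - 1) (-1) (-1)).foldl
      (fun (st : List (String × Int) × List Char) i =>
        let suffix := cs.getD i.toNat ' ' :: st.2
        (st.1 ++ [(String.ofList suffix, i)], suffix))
      (acc, cs.drop m)
    = (acc ++ ((List.range m).map (fun k => (String.ofList (cs.drop k), (k : Int)))).reverse,
       cs.drop 0) := by
  induction m generalizing acc with
  | zero =>
    rw [PySem.List.pyRange_neg_one_eq_nil (by norm_num)]
    simp
  | succ m ih =>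
    have hlt : m < cs.length := hm
    have hcons : PySem.List.pyRange (((m : Nat) + 1 : Int) - 1) (-1) (-1)
        = (m : Int) :: PySem.List.pyRange ((m : Int) - 1) (-1) (-1) := by
      have : (((m : Nat) + 1 : Int) - 1) = (m : Int) := by ring
      rw [this, PySem.List.pyRange_neg_one_cons (by omega)]
    have hg : cs.getD ((m : Int)).toNat ' ' = cs[m] := by
      simp [List.getD_eq_getElem?_getD, List.getElem?_eq_getElem hlt]
    have hdrop : cs.getD ((m : Int)).toNat ' ' :: cs.drop (m + 1) = cs.drop m := by
      rw [hg, ← List.drop_eq_getElem_cons hlt]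
    push_cast at hcons ⊢
    rw [hcons, List.foldl_cons]
    simp only [hdrop]
    rw [ih (Nat.le_of_lt hlt)]
    simp [List.range_succ]

theorem pvBEq (line : String) :
    get_all_suffixes_alt line = ((pvCanonPairs line.toList).map (·.1), pvCanonPairs line.toList) := by
  unfold get_all_suffixes_alt
  dsimp only
  have hinit : ([] : List Char) = line.toList.drop line.toList.length := by
    simp
  rw [hinit, pvBFold line.toList line.toList.length (le_refl _) []]
  simp only [List.nil_append, List.reverse_reverse]
  have hpairs : (PySem.Dict.ofList (pvCanonPairs line.toList)).items = pvCanonPairs line.toList := by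
    rw [show PySem.Dict.ofList (pvCanonPairs line.toList)
        = (pvCanonPairs line.toList).foldl (fun d p => d.insert p.1 p.2) PySem.Dict.empty from rfl]
    have h := PySem.Dict.items_foldl_insert_fresh (pvCanonPairs line.toList)
      (fun p => p.1) (fun p => p.2) PySem.Dict.empty
      (by intro a _; simp [PySem.Dict.contains_empty])
      (by simpa only [pvCanonPairs, List.map_map] using pvKeysNodup line.toList)
    simpa [PySem.Dict.empty, PySem.Dict.items] using h
  simp only [pvCanonPairs] at hpairs ⊢
  rw [hpairs]

-- ===== VERDICT (by name: the statement is the Claim_ definition above) =====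
theorem get_all_suffixes_spec : Claim_equal_get_all_suffixes := by
  intro line _
  unfold Spec_get_all_suffixes
  rw [pvAEq, pvBEq]
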